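-- pv_equiv track=rewrite | github.com/cutedevill/-DigitalAcademy | command_ flow.py | three_words
-- ===== SOURCE A (Python) =====
-- def three_words(string) -> bool:
--     split_string = string.split()
--     if len(split_string) < 3:
--         return False
--     word_counter = 0
--     for i in range(len(split_string)):
--         if split_string[i].isnumeric():
--             word_counter = 0
--             continue
--         word_counter += 1
--         if word_counter == 3:
--             return True
--     return False
-- ===== SOURCE B (Python) =====
-- def three_words(string) -> bool:
--     words = string.split()
--     return any(not a.isnumeric() and not b.isnumeric() and not c.isnumeric()
--                for a, b, c in zip(words, words[1:], words[2:]))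
-- ===== Notes on version B (the rewrite author's own statement) =====
-- stated objective: idiomatic
-- what changed: Replaces the explicit counter-with-reset loop and the len<3 guard by a single any() over the sliding window of word triples built with zip.
import Mathlib
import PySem

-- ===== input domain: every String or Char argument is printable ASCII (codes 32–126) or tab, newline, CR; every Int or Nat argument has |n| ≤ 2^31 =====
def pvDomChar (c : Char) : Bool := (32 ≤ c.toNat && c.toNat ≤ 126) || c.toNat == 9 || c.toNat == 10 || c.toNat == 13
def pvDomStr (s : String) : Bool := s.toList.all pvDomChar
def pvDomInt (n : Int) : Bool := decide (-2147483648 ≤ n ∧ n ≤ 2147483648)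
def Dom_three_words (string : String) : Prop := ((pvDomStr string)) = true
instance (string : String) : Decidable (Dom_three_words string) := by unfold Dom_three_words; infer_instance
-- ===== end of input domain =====

-- B replaces A's counter-with-reset loop (and its len<3 guard) by a single any() over
-- the sliding window of word triples built with zip; same O(n) cost, more idiomatic.


-- ===== PORT A =====
-- the for-loop over split_string with word_counter, 'continue' on numeric, early 'return True' at 3
-- (str.isnumeric coincides with str.isdigit on the printable-ASCII domain, so it is ported as strIsdigit)
def threeWordsLoopA (c : Nat) (ws : List String) : Bool :=
  match ws with
  | [] => false
  | w :: t =>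
    if PySem.Str.strIsdigit w then threeWordsLoopA 0 t
    else if c + 1 = 3 then true else threeWordsLoopA (c + 1) t

def three_words (string : String) : Bool :=
  let split_string := PySem.Str.split₀ string
  if split_string.length < 3 then false
  else threeWordsLoopA 0 split_string

-- ===== PORT B =====
-- any(...) over zip(words, words[1:], words[2:])
def three_words_alt (string : String) : Bool :=
  let words := PySem.Str.split₀ string
  ((words.zip (words.drop 1)).zip (words.drop 2)).any
    (fun p => !(PySem.Str.strIsdigit p.1.1) && !(PySem.Str.strIsdigit p.1.2)
              && !(PySem.Str.strIsdigit p.2))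

-- ===== PRECONDITION & SPEC =====
def Spec_three_words (string : String) (out : Bool) : Prop := out = three_words_alt string
instance (string : String) (out : Bool) : Decidable (Spec_three_words string out) := by unfold Spec_three_words; infer_instance

-- ===== CLAIM (what is proved, stated in full; the proofs are below) =====
def Claim_equal_three_words : Prop := ∀ (string : String), Dom_three_words string → Spec_three_words string (three_words string)

-- ===== LEMMAS AND PROOFS =====

-- structural form of B's sliding window: some triple of consecutive words is all non-numeric
def tripScan (ws : List String) : Bool :=
  match ws with
  | a :: b :: c :: t =>
    (!(PySem.Str.strIsdigit a) && !(PySem.Str.strIsdigit b) && !(PySem.Str.strIsdigit c))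
      || tripScan (b :: c :: t)
  | _ => false

-- first word exists and is non-numeric
def head1 (ws : List String) : Bool :=
  match ws with
  | a :: _ => !(PySem.Str.strIsdigit a)
  | [] => false

-- first two words exist and are non-numeric
def head2 (ws : List String) : Bool :=
  match ws with
  | a :: b :: _ => !(PySem.Str.strIsdigit a) && !(PySem.Str.strIsdigit b)
  | _ => false

theorem zip_any_eq_tripScan (ws : List String) :
    ((ws.zip (ws.drop 1)).zip (ws.drop 2)).any
      (fun p => !(PySem.Str.strIsdigit p.1.1) && !(PySem.Str.strIsdigit p.1.2)
                && !(PySem.Str.strIsdigit p.2)) = tripScan ws := by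
  match ws with
  | a :: b :: c :: t =>
    simp only [List.drop, List.zip_cons_cons, List.any_cons, tripScan]
    rw [← zip_any_eq_tripScan (b :: c :: t)]
    simp [List.drop]
  | [] | [_] | [_, _] => rfl

theorem head2_imp_head1 (ws : List String) (h : head2 ws = true) : head1 ws = true := by
  match ws with
  | _ :: b :: t => simp_all [head1, head2]
  | [] | [_] => simp_all [head2]

theorem tripScan_cons (x : String) (t : List String) :
    tripScan (x :: t) = (if PySem.Chars.strIsdigit x.toList then tripScan t
                         else (head2 t || tripScan t)) := by
  match t with
  | b :: c :: u =>
    by_cases hx : PySem.Chars.strIsdigit x.toList = true <;>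
      simp [tripScan, head2, hx]
  | [] | [_] =>
    by_cases hx : PySem.Chars.strIsdigit x.toList = true <;> simp [tripScan, head2, hx]

theorem loopA_characterization (ws : List String) :
    threeWordsLoopA 0 ws = tripScan ws
    ∧ threeWordsLoopA 1 ws = (head2 ws || tripScan ws)
    ∧ threeWordsLoopA 2 ws = (head1 ws || tripScan ws) := by
  induction ws with
  | nil => exact ⟨rfl, rfl, rfl⟩
  | cons a t ih =>
    obtain ⟨ih0, ih1, ih2⟩ := ih
    rw [tripScan_cons]
    by_cases ha : PySem.Chars.strIsdigit a.toList = true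
    · have hh2 : head2 (a :: t) = false := by
        match t with
        | b :: u => simp [head2, ha]
        | [] => rfl
      refine ⟨?_, ?_, ?_⟩ <;> simp [threeWordsLoopA, ha, head1, hh2, ih0]
    · have hh2 : head2 (a :: t) = head1 t := by
        match t with
        | b :: u => simp [head1, head2, ha]
        | [] => rfl
      refine ⟨?_, ?_, ?_⟩
      · simp [threeWordsLoopA, ha, ih1]
      · rw [show threeWordsLoopA 1 (a :: t) = threeWordsLoopA 2 t by
              simp [threeWordsLoopA, ha]]
        rw [ih2, hh2, if_neg ha]
        cases h1 : head1 t
        · rw [show head2 t = false by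
                cases h2 : head2 t
                · rfl
                · exact absurd (head2_imp_head1 t h2) (by simp [h1])]
          simp
        · simp
      · simp [threeWordsLoopA, ha, head1]

theorem tripScan_short (ws : List String) (h : ws.length < 3) : tripScan ws = false := by
  match ws, h with
  | [], _ | [_], _ | [_, _], _ => rfl

-- ===== VERDICT (by name: the statement is the Claim_ definition above) =====
theorem three_words_spec : Claim_equal_three_words := by
  intro s _
  unfold Spec_three_words three_words three_words_alt
  rw [zip_any_eq_tripScan]
  by_cases h : (PySem.Str.split₀ s).length < 3
  · simp only [h, if_pos]
    exact (tripScan_short _ h).symm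
  · simp only [h, if_neg, not_false_iff]
    exact (loopA_characterization (PySem.Str.split₀ s)).1
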